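-- pv_equiv track=rewrite | github.com/la466/lincrna_stops_repo | sequence_ops.py | get_subs
-- ===== SOURCE A (Python) =====
-- def calc_subs(motif1, motif2):
--     count = 0
--     for i, nt in enumerate(list(motif1)):
--         if motif2[i] != nt:
--             count += 1
--     return count
--
-- def get_subs(motifs):
--     checked_pairs = []
--     subs = []
--     for motif1 in motifs:
--         for motif2 in motifs:
--             if motif1 != motif2:
--                 if [motif1, motif2] not in checked_pairs and [motif2, motif1] not in checked_pairs:
--                     subs.append(calc_subs(motif1, motif2))
--                     checked_pairs.append([motif1, motif2])
--     return subs
-- ===== SOURCE B (Python) =====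
-- def get_subs(motifs):
--     unique = []
--     for m in motifs:
--         if m not in unique:
--             unique.append(m)
--     subs = []
--     while unique:
--         motif1 = unique.pop(0)
--         for motif2 in unique:
--             subs.append(sum(a != b for a, b in zip(motif1, motif2)))
--     return subs
-- ===== Notes on version B (the rewrite author's own statement) =====
-- stated objective: simpler
-- what changed: B first deduplicates the motifs in first-occurrence order, then emits the combination counts with a pop-and-scan loop over the distinct motifs, eliminating A's checked_pairs list and its quadratic ordered-pair membership scans; mismatches are counted with zip instead of index lookups.
import Mathlib
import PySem

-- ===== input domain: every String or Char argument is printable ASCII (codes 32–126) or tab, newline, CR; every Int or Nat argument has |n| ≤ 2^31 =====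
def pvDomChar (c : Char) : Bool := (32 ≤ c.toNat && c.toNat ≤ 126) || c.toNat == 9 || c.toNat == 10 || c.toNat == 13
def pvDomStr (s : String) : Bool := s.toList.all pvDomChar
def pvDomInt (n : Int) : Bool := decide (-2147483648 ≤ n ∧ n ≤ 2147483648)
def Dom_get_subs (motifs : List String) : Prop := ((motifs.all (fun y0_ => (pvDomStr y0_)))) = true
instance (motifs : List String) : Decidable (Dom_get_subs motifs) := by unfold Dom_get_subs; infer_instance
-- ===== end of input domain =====

-- B replaces A's quadratic checked_pairs bookkeeping by a first-occurrence dedup followed by a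
-- pop-and-scan combinations loop (simpler); equivalence of return values is proved on Pre_ below.

-- ===== PORT A =====
-- calc_subs: none = IndexError (motif2 shorter than motif1); unreachable under Pre_get_subs
def calc_subs_A (motif1 motif2 : String) : Option Int :=
  (PySem.List.enumerate motif1.toList 0).foldl
    (fun o p =>
      o.bind fun count =>
        match PySem.Str.pyGet? motif2 p.1 with
        | none => none
        | some c => some (if c ≠ p.2 then count + 1 else count))
    (some 0)

def get_subs (motifs : List String) : List Int :=
  (motifs.foldl
    (fun (st : List (String × String) × List Int) motif1 =>
      motifs.foldl
        (fun (st : List (String × String) × List Int) motif2 =>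
          if motif1 ≠ motif2 then
            if (motif1, motif2) ∉ st.1 ∧ (motif2, motif1) ∉ st.1 then
              (st.1 ++ [(motif1, motif2)], st.2 ++ [(calc_subs_A motif1 motif2).getD 0])
            else st
          else st)
        st)
    ([], [])).2

-- ===== PORT B =====
def dedupFO (motifs : List String) : List String :=
  motifs.foldl (fun unique m => if m ∈ unique then unique else unique ++ [m]) []

def calc_subs_B (motif1 motif2 : String) : Int :=
  (motif1.toList.zip motif2.toList).foldl
    (fun c p => c + (if p.1 ≠ p.2 then 1 else 0)) 0

def altLoop : List String → List Int → List Int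
  | [], subs => subs
  | motif1 :: unique, subs =>
      altLoop unique (subs ++ unique.map (fun motif2 => calc_subs_B motif1 motif2))

def get_subs_alt (motifs : List String) : List Int :=
  altLoop (dedupFO motifs) []

-- ===== PRECONDITION & SPEC =====
-- Pre_ excludes exactly the inputs on which A raises IndexError: calc_subs(m1, m2) indexes m2 by
-- positions of m1, so A raises iff some distinct motif is strictly longer than a later-first-occurring one.
def Pre_get_subs (motifs : List String) : Prop :=
  List.Pairwise (fun a b => a.toList.length ≤ b.toList.length) (dedupFO motifs)
instance (motifs : List String) : Decidable (Pre_get_subs motifs) := by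
  unfold Pre_get_subs; infer_instance

def pvWitness_get_subs : List String := ["GTA", "GTC", "GTA", "AAT"]

def Spec_get_subs (motifs : List String) (out : List Int) : Prop := out = get_subs_alt motifs
instance (motifs : List String) (out : List Int) : Decidable (Spec_get_subs motifs out) := by
  unfold Spec_get_subs; infer_instance

-- ===== CLAIM (what is proved, stated in full; the proofs are below) =====
def Claim_equal_get_subs : Prop := ∀ (motifs : List String), Dom_get_subs motifs → Pre_get_subs motifs → Spec_get_subs motifs (get_subs motifs)

-- ===== LEMMAS AND PROOFS =====

-- the two loop bodies of A, named for the proofs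
def innerf (motif1 : String) (st : List (String × String) × List Int) (motif2 : String) :
    List (String × String) × List Int :=
  if motif1 ≠ motif2 then
    if (motif1, motif2) ∉ st.1 ∧ (motif2, motif1) ∉ st.1 then
      (st.1 ++ [(motif1, motif2)], st.2 ++ [(calc_subs_A motif1 motif2).getD 0])
    else st
  else st

theorem get_subs_eq (motifs : List String) :
    get_subs motifs
      = (motifs.foldl (fun st motif1 => motifs.foldl (innerf motif1) st) ([], [])).2 := rfl

-- checked_pairs / subs after processing a prefix S of the distinct motifs, with T still to come
def gpairs : List String → List String → List (String × String)
  | [], _ => []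
  | u :: S, T => (S ++ T).map (fun v => (u, v)) ++ gpairs S T

def hsubs : List String → List String → List Int
  | [], _ => []
  | u :: S, T => (S ++ T).map (fun v => (calc_subs_A u v).getD 0) ++ hsubs S T

theorem gpairs_shift (S T : List String) (m : String) :
    gpairs (S ++ [m]) T = gpairs S (m :: T) ++ T.map (fun v => (m, v)) := by
  induction S with
  | nil => simp [gpairs]
  | cons u S ih => simp [gpairs, ih]

theorem hsubs_shift (S T : List String) (m : String) :
    hsubs (S ++ [m]) T = hsubs S (m :: T) ++ T.map (fun v => (calc_subs_A m v).getD 0) := by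
  induction S with
  | nil => simp [hsubs]
  | cons u S ih => simp [hsubs, ih]

theorem mem_gpairs {a b : String} {S T : List String} (ha : a ∈ S) (hb : b ∈ T) :
    (a, b) ∈ gpairs S T := by
  induction S with
  | nil => cases ha
  | cons u S ih =>
      rcases List.mem_cons.mp ha with h | h
      · subst h; exact List.mem_append.mpr (Or.inl (List.mem_map.mpr ⟨b, List.mem_append.mpr (Or.inr hb), rfl⟩))
      · exact List.mem_append.mpr (Or.inr (ih h))

theorem gpairs_fst {a b : String} {S T : List String} (h : (a, b) ∈ gpairs S T) : a ∈ S := by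
  induction S with
  | nil => cases h
  | cons u S ih =>
      rcases List.mem_append.mp h with h | h
      · rcases List.mem_map.mp h with ⟨v, _, hv⟩
        cases hv; exact List.mem_cons_self
      · exact List.mem_cons_of_mem _ (ih h)

theorem mem_gpairs_or {a b : String} {S T : List String}
    (ha : a ∈ S) (hb : b ∈ S) (hab : a ≠ b) :
    (a, b) ∈ gpairs S T ∨ (b, a) ∈ gpairs S T := by
  induction S with
  | nil => cases ha
  | cons u S ih =>
      rcases List.mem_cons.mp ha with h1 | h1
      · subst h1
        have hb' : b ∈ S := by
          rcases List.mem_cons.mp hb with h | h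
          · exact absurd h.symm hab
          · exact h
        exact Or.inl (List.mem_append.mpr (Or.inl (List.mem_map.mpr ⟨b, List.mem_append.mpr (Or.inl hb'), rfl⟩)))
      · rcases List.mem_cons.mp hb with h2 | h2
        · subst h2
          exact Or.inr (List.mem_append.mpr (Or.inl (List.mem_map.mpr ⟨a, List.mem_append.mpr (Or.inl h1), rfl⟩)))
        · rcases ih h1 h2 with h | h
          · exact Or.inl (List.mem_append.mpr (Or.inr h))
          · exact Or.inr (List.mem_append.mpr (Or.inr h))

-- dedup-fold facts (generalized accumulator)
theorem foldl_dstep_prefix (l : List String) (u : List String) :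
    u <+: l.foldl (fun u m => if m ∈ u then u else u ++ [m]) u := by
  induction l generalizing u with
  | nil => exact List.prefix_refl u
  | cons x l ih =>
      simp only [List.foldl_cons]
      by_cases hx : x ∈ u
      · simpa [hx] using ih u
      · have := ih (u ++ [x])
        rw [if_neg hx]
        exact List.IsPrefix.trans (List.prefix_append u [x]) this

theorem mem_foldl_dstep (l : List String) (u : List String) (x : String) :
    x ∈ l.foldl (fun u m => if m ∈ u then u else u ++ [m]) u ↔ x ∈ u ∨ x ∈ l := by
  induction l generalizing u with
  | nil => simp
  | cons y l ih =>
      simp only [List.foldl_cons]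
      by_cases hy : y ∈ u
      · rw [if_pos hy, ih]
        constructor
        · rintro (h | h)
          · exact Or.inl h
          · exact Or.inr (List.mem_cons_of_mem _ h)
        · rintro (h | h)
          · exact Or.inl h
          · rcases List.mem_cons.mp h with h | h
            · subst h; exact Or.inl hy
            · exact Or.inr h
      · rw [if_neg hy, ih]
        simp only [List.mem_append, List.mem_cons]
        tauto

theorem nodup_foldl_dstep (l : List String) (u : List String) (hu : u.Nodup) :
    (l.foldl (fun u m => if m ∈ u then u else u ++ [m]) u).Nodup := by
  induction l generalizing u with
  | nil => exact hu
  | cons y l ih =>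
      simp only [List.foldl_cons]
      by_cases hy : y ∈ u
      · rw [if_pos hy]; exact ih u hu
      · rw [if_neg hy]
        refine ih _ (List.Nodup.append hu (List.nodup_singleton y) ?_)
        intro a ha hay
        rw [List.mem_singleton] at hay
        subst hay
        exact hy ha

theorem dedupFO_nodup (motifs : List String) : (dedupFO motifs).Nodup :=
  nodup_foldl_dstep motifs [] List.nodup_nil

theorem mem_dedupFO (motifs : List String) (x : String) : x ∈ dedupFO motifs ↔ x ∈ motifs := by
  simpa using mem_foldl_dstep motifs [] x

theorem dedupFO_append_singleton (q : List String) (w : String) :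
    dedupFO (q ++ [w]) = if w ∈ dedupFO q then dedupFO q else dedupFO q ++ [w] := by
  simp [dedupFO, List.foldl_append]

theorem dedupFO_prefix (q r : List String) : dedupFO q <+: dedupFO (q ++ r) := by
  simpa [dedupFO, List.foldl_append] using foldl_dstep_prefix r (dedupFO q)

-- helper: distinct values of T' seen so far (in first-occurrence order)
def Pfil (T' q : List String) : List String :=
  (dedupFO q).filter (fun v => decide (v ∈ T'))

-- inner loop, motif1 = m not yet processed
theorem inner_main (motifs S T' : List String) (m : String)
    (hU : dedupFO motifs = S ++ m :: T') (hnd : (S ++ m :: T').Nodup) :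
    ∀ (r q : List String), motifs = q ++ r →
      r.foldl (innerf m)
        (gpairs S (m :: T') ++ (Pfil T' q).map (fun v => (m, v)),
         hsubs S (m :: T') ++ (Pfil T' q).map (fun v => (calc_subs_A m v).getD 0))
      = (gpairs S (m :: T') ++ T'.map (fun v => (m, v)),
         hsubs S (m :: T') ++ T'.map (fun v => (calc_subs_A m v).getD 0)) := by
  have hdisj : S.Disjoint (m :: T') := List.disjoint_of_nodup_append hnd
  have hndmT : (m :: T').Nodup := List.Nodup.of_append_right hnd
  have hmT : m ∉ T' := (List.nodup_cons.mp hndmT).1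
  have hSm : ∀ x ∈ S, x ≠ m := fun x hx h => hdisj hx (h ▸ List.mem_cons_self)
  have hST : ∀ x ∈ S, x ∉ T' := fun x hx h => hdisj hx (List.mem_cons_of_mem _ h)
  have hmS : m ∉ S := fun h => hSm m h rfl
  intro r
  induction r with
  | nil =>
      intro q hq
      rw [List.append_nil] at hq
      subst hq
      have hP : Pfil T' motifs = T' := by
        unfold Pfil
        rw [hU, List.filter_append]
        have h1 : S.filter (fun v => decide (v ∈ T')) = [] :=
          List.filter_eq_nil_iff.mpr (fun a ha => by simpa using hST a ha)
        have h2 : (m :: T').filter (fun v => decide (v ∈ T')) = T' := by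
          rw [List.filter_cons_of_neg (by simpa using hmT)]
          exact List.filter_eq_self.mpr (fun a ha => by simpa using ha)
        rw [h1, h2, List.nil_append]
      rw [hP, List.foldl_nil]
  | cons w r ih =>
      intro q hq
      have hq' : motifs = (q ++ [w]) ++ r := by simp [hq]
      have hwmot : w ∈ motifs := by
        rw [hq]; exact List.mem_append.mpr (Or.inr List.mem_cons_self)
      have hwU : w ∈ S ++ m :: T' := by
        rw [← hU]; exact (mem_dedupFO motifs w).mpr hwmot
      rw [List.foldl_cons]
      have hstep : innerf m
          (gpairs S (m :: T') ++ (Pfil T' q).map (fun v => (m, v)),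
           hsubs S (m :: T') ++ (Pfil T' q).map (fun v => (calc_subs_A m v).getD 0)) w
          = (gpairs S (m :: T') ++ (Pfil T' (q ++ [w])).map (fun v => (m, v)),
             hsubs S (m :: T') ++ (Pfil T' (q ++ [w])).map (fun v => (calc_subs_A m v).getD 0)) := by
        rcases List.mem_append.mp hwU with hwS | hwmT
        · -- w ∈ S : pair (w, m) already checked, no change
          have hwm : w ≠ m := hSm w hwS
          have hmem : (w, m) ∈ gpairs S (m :: T') ++ (Pfil T' q).map (fun v => (m, v)) :=
            List.mem_append.mpr (Or.inl (mem_gpairs hwS List.mem_cons_self))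
          have hPf : Pfil T' (q ++ [w]) = Pfil T' q := by
            unfold Pfil
            rw [dedupFO_append_singleton]
            split_ifs
            · rfl
            · rw [List.filter_append]
              simp [hST w hwS]
          rw [hPf]
          simp [innerf, Ne.symm hwm, hmem]
        · rcases List.mem_cons.mp hwmT with hwm | hwT
          · -- w = m : motif1 = motif2, no change
            subst hwm
            have hPf : Pfil T' (q ++ [w]) = Pfil T' q := by
              unfold Pfil
              rw [dedupFO_append_singleton]
              split_ifs
              · rfl
              · rw [List.filter_append]
                simp [hmT]
            rw [hPf]
            simp [innerf]
          · -- w ∈ T'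
            have hwm : w ≠ m := fun h => hmT (h ▸ hwT)
            by_cases hwq : w ∈ dedupFO q
            · -- already appended earlier
              have hwP : w ∈ Pfil T' q :=
                List.mem_filter.mpr ⟨hwq, by simpa using hwT⟩
              have hmem : (m, w) ∈ gpairs S (m :: T') ++ (Pfil T' q).map (fun v => (m, v)) :=
                List.mem_append.mpr (Or.inr (List.mem_map.mpr ⟨w, hwP, rfl⟩))
              have hPf : Pfil T' (q ++ [w]) = Pfil T' q := by
                unfold Pfil
                rw [dedupFO_append_singleton, if_pos hwq]
              rw [hPf]
              simp [innerf, Ne.symm hwm, hmem]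
            · -- first time w is reached: pair (m, w) is appended
              have hPf : Pfil T' (q ++ [w]) = Pfil T' q ++ [w] := by
                unfold Pfil
                rw [dedupFO_append_singleton, if_neg hwq, List.filter_append]
                simp [hwT]
              have h1 : (m, w) ∉ gpairs S (m :: T') ++ (Pfil T' q).map (fun v => (m, v)) := by
                intro hmem
                rcases List.mem_append.mp hmem with hmem | hmem
                · exact hmS (gpairs_fst hmem)
                · rcases List.mem_map.mp hmem with ⟨v, hv, hveq⟩
                  cases hveq
                  exact hwq (List.mem_filter.mp hv).1
              have h2 : (w, m) ∉ gpairs S (m :: T') ++ (Pfil T' q).map (fun v => (m, v)) := by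
                intro hmem
                rcases List.mem_append.mp hmem with hmem | hmem
                · exact hdisj (gpairs_fst hmem) (List.mem_cons_of_mem _ hwT)
                · rcases List.mem_map.mp hmem with ⟨v, hv, hveq⟩
                  exact hwm (congrArg Prod.fst hveq).symm
              rw [hPf]
              unfold innerf
              rw [if_pos (Ne.symm hwm), if_pos ⟨h1, h2⟩]
              simp [List.map_append]
      rw [hstep]
      exact ih (q ++ [w]) hq'

theorem inner_id (ms S T : List String) (m : String) (hm : m ∈ S)
    (hall : ∀ w ∈ ms, w ∈ S ∨ w ∈ T) :
    ms.foldl (innerf m) (gpairs S T, hsubs S T) = (gpairs S T, hsubs S T) := by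
  induction ms with
  | nil => rfl
  | cons w ms ih =>
      have hstep : innerf m (gpairs S T, hsubs S T) w = (gpairs S T, hsubs S T) := by
        by_cases hmw : m = w
        · simp [innerf, hmw]
        · rcases hall w List.mem_cons_self with hw | hw
          · rcases mem_gpairs_or (T := T) hm hw hmw with h | h
            · simp [innerf, hmw, h]
            · simp [innerf, hmw, h]
          · have h : (m, w) ∈ gpairs S T := mem_gpairs hm hw
            simp [innerf, hmw, h]
      rw [List.foldl_cons, hstep]
      exact ih (fun v hv => hall v (List.mem_cons_of_mem _ hv))

theorem outer_main (motifs : List String) :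
    ∀ (r q : List String), motifs = q ++ r →
      r.foldl (fun st motif1 => motifs.foldl (innerf motif1) st)
        (gpairs (dedupFO q) ((dedupFO motifs).drop (dedupFO q).length),
         hsubs (dedupFO q) ((dedupFO motifs).drop (dedupFO q).length))
      = (gpairs (dedupFO motifs) [], hsubs (dedupFO motifs) []) := by
  intro r
  induction r with
  | nil =>
      intro q hq
      rw [List.append_nil] at hq
      subst hq
      rw [List.foldl_nil, List.drop_length]
  | cons w r ih =>
      intro q hq
      have hq' : motifs = (q ++ [w]) ++ r := by simp [hq]
      have hpre : dedupFO q <+: dedupFO motifs := by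
        rw [hq]; exact dedupFO_prefix q (w :: r)
      obtain ⟨t, ht⟩ := hpre
      have hdrop : (dedupFO motifs).drop (dedupFO q).length = t := by
        rw [← ht, List.drop_left]
      rw [List.foldl_cons, hdrop]
      by_cases hw : w ∈ dedupFO q
      · rw [inner_id motifs (dedupFO q) t w hw ?hall]
        case hall =>
          intro v hv
          have hvU : v ∈ dedupFO motifs := (mem_dedupFO motifs v).mpr hv
          rw [← ht] at hvU
          exact List.mem_append.mp hvU
        have hres := ih (q ++ [w]) hq'
        rw [dedupFO_append_singleton, if_pos hw, hdrop] at hres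
        exact hres
      · have hpre' : dedupFO (q ++ [w]) <+: dedupFO motifs := by
          rw [hq']; exact dedupFO_prefix _ r
        rw [dedupFO_append_singleton, if_neg hw] at hpre'
        obtain ⟨t', ht'⟩ := hpre'
        have ht2 : t = w :: t' := by
          have hcat : dedupFO q ++ t = dedupFO q ++ (w :: t') := by
            rw [ht, ← ht']; simp
          exact List.append_cancel_left hcat
        have hU : dedupFO motifs = dedupFO q ++ w :: t' := by rw [← ht, ht2]
        have hnd : (dedupFO q ++ w :: t').Nodup := hU ▸ dedupFO_nodup motifs
        have hin := inner_main motifs (dedupFO q) t' w hU hnd motifs [] (by simp)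
        rw [show Pfil t' [] = [] from rfl] at hin
        simp only [List.map_nil, List.append_nil] at hin
        rw [ht2, hin, ← gpairs_shift, ← hsubs_shift]
        have hres := ih (q ++ [w]) hq'
        rw [dedupFO_append_singleton, if_neg hw] at hres
        have hdrop' : (dedupFO motifs).drop (dedupFO q ++ [w]).length = t' := by
          rw [← ht', List.drop_left]
        rw [hdrop'] at hres
        exact hres

theorem getsubs_hsubs (motifs : List String) :
    get_subs motifs = hsubs (dedupFO motifs) [] := by
  have h := outer_main motifs motifs [] rfl
  rw [get_subs_eq]
  simp only [dedupFO, List.foldl_nil] at h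
  simpa [gpairs, hsubs, dedupFO] using congrArg Prod.snd h

-- B side
theorem altLoop_acc (L : List String) (s : List Int) :
    altLoop L s = s ++ altLoop L [] := by
  induction L generalizing s with
  | nil => simp [altLoop]
  | cons m rest ih =>
      simp only [altLoop, List.nil_append]
      rw [ih (s ++ _), ih (List.map _ rest), List.append_assoc]

theorem calcA_aux (m2 : String) (l1 : List Char) : ∀ (k : Nat) (acc : Int),
    k + l1.length ≤ m2.toList.length →
    (PySem.List.enumerate l1 (k : Int)).foldl
      (fun o p =>
        o.bind fun count =>
          match PySem.Str.pyGet? m2 p.1 with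
          | none => none
          | some c => some (if c ≠ p.2 then count + 1 else count)) (some acc)
    = some ((l1.zip (m2.toList.drop k)).foldl
        (fun c p => c + (if p.1 ≠ p.2 then 1 else 0)) acc) := by
  induction l1 with
  | nil => intro k acc _; simp [PySem.List.enumerate_nil]
  | cons c l1 ih =>
      intro k acc h
      have hk : k < m2.toList.length := by
        simp only [List.length_cons] at h; omega
      have hdrop : m2.toList.drop k = m2.toList[k] :: m2.toList.drop (k + 1) :=
        List.drop_eq_getElem_cons hk
      have hget : PySem.Str.pyGet? m2 ((k : Nat) : Int) = some (m2.toList[k]) := by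
        rw [PySem.Str.pyGet?_natCast]
        exact List.getElem?_eq_getElem hk
      have hcast : ((k : Nat) : Int) + 1 = (((k + 1 : Nat)) : Int) := by push_cast; ring
      have hinit : ((some acc).bind fun count =>
          match PySem.Str.pyGet? m2 (((k : Int), c) : Int × Char).1 with
          | none => none
          | some ch => some (if ch ≠ (((k : Int), c) : Int × Char).2 then count + 1 else count))
          = some (if m2.toList[k] ≠ c then acc + 1 else acc) := by
        show ((some acc).bind fun count =>
          match PySem.Str.pyGet? m2 ((k : Int)) with
          | none => none
          | some ch => some (if ch ≠ c then count + 1 else count))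
          = some (if m2.toList[k] ≠ c then acc + 1 else acc)
        rw [hget]
        rfl
      rw [PySem.List.enumerate_cons, List.foldl_cons, hdrop, List.zip_cons_cons, List.foldl_cons,
        hinit, hcast, ih (k + 1) _ (by simp only [List.length_cons] at h; omega)]
      have hacc : (if m2.toList[k] ≠ c then acc + 1 else acc)
          = acc + (if c ≠ m2.toList[k] then 1 else 0) := by
        by_cases h' : m2.toList[k] = c
        · simp [h']
        · rw [if_pos h', if_pos (Ne.symm h')]
      rw [hacc]

theorem calcAB (m1 m2 : String) (h : m1.toList.length ≤ m2.toList.length) :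
    calc_subs_A m1 m2 = some (calc_subs_B m1 m2) := by
  have haux := calcA_aux m2 m1.toList 0 0 (by simpa using h)
  simpa [calc_subs_A, calc_subs_B] using haux

theorem hsubs_altLoop (L : List String)
    (h : List.Pairwise (fun a b => a.toList.length ≤ b.toList.length) L) :
    hsubs L [] = altLoop L [] := by
  induction L with
  | nil => rfl
  | cons u S ih =>
      rcases List.pairwise_cons.mp h with ⟨hu, hS⟩
      rw [hsubs, altLoop, altLoop_acc, List.nil_append, ← ih hS]
      congr 1
      simp only [List.append_nil]
      exact List.map_congr_left (fun v hv => by rw [calcAB u v (hu v hv)]; rfl)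

-- ===== VERDICT (by name: the statement is the Claim_ definition above) =====
theorem get_subs_spec : Claim_equal_get_subs := by
  intro motifs _ hpre
  unfold Spec_get_subs get_subs_alt
  rw [getsubs_hsubs, hsubs_altLoop _ hpre]
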